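-- pv_equiv track=rewrite | github.com/taishi-hashimoto/yamlaug | src/yamlaug/pointer.py | parse_json_pointer
-- ===== SOURCE A (Python) =====
-- def _decode_token(token: str) -> str:
--     return token.replace("~1", "/").replace("~0", "~")
--
-- def parse_json_pointer(ptr: str) -> list[str]:
--     if ptr in ("", "/"):
--         return []
--     if not ptr.startswith("/"):
--         raise ValueError("JSON Pointer must start with '/'")
--
--     raw_tokens = ptr.split("/")[1:]
--     result: list[str] = []
--     for token in raw_tokens:
--         decoded = _decode_token(token)
--         result.append(decoded)
--     return result
-- ===== SOURCE B (Python) =====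
-- def parse_json_pointer(ptr: str) -> list[str]:
--     if ptr in ("", "/"):
--         return []
--     if not ptr.startswith("/"):
--         raise ValueError("JSON Pointer must start with '/'")
--     tokens: list[str] = []
--     buf: list[str] = []
--     i, n = 1, len(ptr)
--     while i < n:
--         c = ptr[i]
--         if c == "/":
--             tokens.append("".join(buf))
--             buf = []
--             i += 1
--         elif c == "~" and i + 1 < n and ptr[i + 1] == "1":
--             buf.append("/")
--             i += 2
--         elif c == "~" and i + 1 < n and ptr[i + 1] == "0":
--             buf.append("~")
--             i += 2
--         else:
--             buf.append(c)
--             i += 1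
--     tokens.append("".join(buf))
--     return tokens
-- ===== Notes on version B (the rewrite author's own statement) =====
-- stated objective: alternative
-- what changed: A splits on '/' and then runs two sequential .replace passes over each token; B makes a single escape-aware left-to-right scan of the string, flushing a buffer on '/' and decoding '~1'/'~0' in place.
import Mathlib
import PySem

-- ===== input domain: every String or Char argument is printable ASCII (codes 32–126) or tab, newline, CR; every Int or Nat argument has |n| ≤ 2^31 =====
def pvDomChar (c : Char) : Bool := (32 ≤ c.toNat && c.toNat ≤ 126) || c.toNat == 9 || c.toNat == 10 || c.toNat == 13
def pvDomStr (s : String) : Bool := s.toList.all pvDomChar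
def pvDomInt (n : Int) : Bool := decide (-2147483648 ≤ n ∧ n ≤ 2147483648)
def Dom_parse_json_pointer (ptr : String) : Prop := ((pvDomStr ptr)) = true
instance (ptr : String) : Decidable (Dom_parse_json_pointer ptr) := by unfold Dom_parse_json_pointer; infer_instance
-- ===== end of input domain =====

-- B replaces A's split-then-double-replace decomposition with one escape-aware left-to-right scan (alternative decomposition, same cost).

-- ===== PORT A =====
def pv_decode_token (token : String) : String :=
  PySem.Str.replace (PySem.Str.replace token "~1" "/") "~0" "~"

def parse_json_pointer (ptr : String) : List String :=
  if ptr = "" ∨ ptr = "/" then []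
  else if ¬ (PySem.Str.startswith ptr "/" = true) then []  -- Python: raise ValueError; excluded by Pre_
  else
    -- sep "/" is nonempty, so split? is always `some` here
    let raw_tokens := PySem.List.slice ((PySem.Str.split? ptr "/").getD []) (some 1) none
    raw_tokens.foldl (fun result token => result ++ [pv_decode_token token]) []

-- ===== PORT B =====
-- the while-loop of Source B: buf and tokens are Python's lists grown by append (kept reversed here)
def pvScanGo : List Char → List Char → List (List Char) → List (List Char)
  | [], buf, toks => (buf.reverse :: toks).reverse
  | '/' :: t, buf, toks => pvScanGo t [] (buf.reverse :: toks)
  | '~' :: '1' :: t, buf, toks => pvScanGo t ('/' :: buf) toks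
  | '~' :: '0' :: t, buf, toks => pvScanGo t ('~' :: buf) toks
  | c :: t, buf, toks => pvScanGo t (c :: buf) toks

def parse_json_pointer_alt (ptr : String) : List String :=
  if ptr = "" ∨ ptr = "/" then []
  else if ¬ (PySem.Str.startswith ptr "/" = true) then []  -- Python: raise ValueError; excluded by Pre_
  else (pvScanGo (ptr.toList.drop 1) [] []).map String.ofList

-- ===== PRECONDITION & SPEC =====
-- Pre_ excludes exactly the inputs where A raises ValueError (no leading '/', except the special case "")
def Pre_parse_json_pointer (ptr : String) : Prop :=
  ptr = "" ∨ PySem.Str.startswith ptr "/" = true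
instance (ptr : String) : Decidable (Pre_parse_json_pointer ptr) := by
  unfold Pre_parse_json_pointer; infer_instance

def pvWitness_parse_json_pointer : String := "/a~1b/c~0~"

def Spec_parse_json_pointer (ptr : String) (out : List String) : Prop := out = parse_json_pointer_alt ptr
instance (ptr : String) (out : List String) : Decidable (Spec_parse_json_pointer ptr out) := by unfold Spec_parse_json_pointer; infer_instance

-- ===== CLAIM (what is proved, stated in full; the proofs are below) =====
def Claim_equal_parse_json_pointer : Prop := ∀ (ptr : String), Dom_parse_json_pointer ptr → Pre_parse_json_pointer ptr → Spec_parse_json_pointer ptr (parse_json_pointer ptr)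

-- ===== LEMMAS AND PROOFS =====

-- pure form of s.replace(String.mk [a,b], String.mk [r])
def pvRepC (a b r : Char) : List Char → List Char
  | [] => []
  | [c] => [c]
  | c :: d :: t => if c = a ∧ d = b then r :: pvRepC a b r t else c :: pvRepC a b r (d :: t)

lemma pvRepC_cons_ne (a b r c : Char) (t : List Char) (h : ¬ (c = a ∧ t.head? = some b)) :
    pvRepC a b r (c :: t) = c :: pvRepC a b r t := by
  cases t with
  | nil => rfl
  | cons d t' =>
    rw [pvRepC, if_neg]
    intro hh
    exact h ⟨hh.1, by rw [hh.2]; rfl⟩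

lemma pref2 (a b c : Char) (t : List Char) :
    (List.isPrefixOf [a, b] (c :: t) = true) ↔ (c = a ∧ t.head? = some b) := by
  cases t with
  | nil => simp [List.isPrefixOf]
  | cons d t' =>
    simp only [List.isPrefixOf, Bool.and_eq_true, beq_iff_eq, List.head?_cons, Option.some.injEq]
    constructor
    · rintro ⟨h1, h2, -⟩; exact ⟨h1.symm, h2.symm⟩
    · rintro ⟨h1, h2⟩; exact ⟨h1.symm, h2.symm, trivial⟩

lemma pvRepC_go (a b r : Char) : ∀ (fuel : Nat) (l acc : List Char), l.length ≤ fuel →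
    PySem.Chars.replace.go [a, b] [r] fuel l acc = acc.reverse ++ pvRepC a b r l := by
  intro fuel
  induction fuel with
  | zero =>
    intro l acc h
    have hl : l = [] := by cases l <;> simp_all
    subst hl
    simp [PySem.Chars.replace.go, pvRepC]
  | succ n ih =>
    intro l acc h
    match l with
    | [] => simp [PySem.Chars.replace.go, pvRepC]
    | c :: t =>
      by_cases hp : List.isPrefixOf [a, b] (c :: t) = true
      · obtain ⟨hc, hh⟩ := (pref2 a b c t).mp hp
        obtain ⟨t', rfl⟩ : ∃ t', t = b :: t' := by
          cases t with
          | nil => simp at hh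
          | cons d t' => exact ⟨t', by simp at hh; rw [hh]⟩
        rw [show PySem.Chars.replace.go [a, b] [r] (n + 1) (c :: b :: t') acc
              = PySem.Chars.replace.go [a, b] [r] n t' (r :: acc) by
            simp [PySem.Chars.replace.go, hp]]
        rw [ih t' (r :: acc) (by simp at h; omega)]
        rw [show pvRepC a b r (c :: b :: t') = r :: pvRepC a b r t' by simp [pvRepC, hc]]
        simp
      · rw [show PySem.Chars.replace.go [a, b] [r] (n + 1) (c :: t) acc
              = PySem.Chars.replace.go [a, b] [r] n t (c :: acc) by
            simp [PySem.Chars.replace.go, hp]]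
        rw [ih t (c :: acc) (by simp at h; omega)]
        rw [pvRepC_cons_ne a b r c t (fun hh => hp ((pref2 a b c t).mpr hh))]
        simp

lemma pvReplaceC_eq (a b r : Char) (l : List Char) :
    PySem.Chars.replace l [a, b] [r] = pvRepC a b r l := by
  rw [PySem.Chars.replace]
  simp only [List.isEmpty_cons]
  exact pvRepC_go a b r l.length l [] (le_refl _)

-- pure split on '/' : (first token, remaining tokens)
def pvSplitP : List Char → List Char × List (List Char)
  | [] => ([], [])
  | c :: t =>
    let p := pvSplitP t
    if c = '/' then ([], p.1 :: p.2) else (c :: p.1, p.2)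

lemma pvSplitOn_go : ∀ (fuel : Nat) (l cur : List Char) (acc : List (List Char)), l.length ≤ fuel →
    PySem.Chars.splitOn.go ['/'] fuel l cur acc
      = acc.reverse ++ ((cur.reverse ++ (pvSplitP l).1) :: (pvSplitP l).2) := by
  intro fuel
  induction fuel with
  | zero =>
    intro l cur acc h
    have hl : l = [] := by cases l <;> simp_all
    subst hl
    simp [PySem.Chars.splitOn.go, pvSplitP]
  | succ n ih =>
    intro l cur acc h
    match l with
    | [] => simp [PySem.Chars.splitOn.go, pvSplitP]
    | c :: t =>
      by_cases hc : c = '/'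
      · subst hc
        rw [show PySem.Chars.splitOn.go ['/'] (n + 1) ('/' :: t) cur acc
              = PySem.Chars.splitOn.go ['/'] n t [] (cur.reverse :: acc) by
            simp [PySem.Chars.splitOn.go, List.isPrefixOf]]
        rw [ih t [] (cur.reverse :: acc) (by simp at h; omega)]
        simp [pvSplitP]
      · have hc' : ¬('/' = c) := fun hh => hc hh.symm
        rw [show PySem.Chars.splitOn.go ['/'] (n + 1) (c :: t) cur acc
              = PySem.Chars.splitOn.go ['/'] n t (c :: cur) acc by
            simp [PySem.Chars.splitOn.go, List.isPrefixOf, hc']]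
        rw [ih t (c :: cur) acc (by simp at h; omega)]
        simp [pvSplitP, hc]

lemma pvSplitOn_eq (l : List Char) :
    PySem.Chars.splitOn l ['/'] = (pvSplitP l).1 :: (pvSplitP l).2 := by
  rw [PySem.Chars.splitOn]
  rw [pvSplitOn_go (l.length + 1) l [] [] (by omega)]
  simp

-- decode = replace "~1"→"/" then "~0"→"~", on char lists
def pvDec (l : List Char) : List Char := pvRepC '~' '0' '~' (pvRepC '~' '1' '/' l)

lemma pvRepC_head? (a b r : Char) (l : List Char) (x : Char)
    (h : (pvRepC a b r l).head? = some x) : x = r ∨ l.head? = some x := by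
  match l with
  | [] => simp [pvRepC] at h
  | [c] => simp [pvRepC] at h; right; simp [h]
  | c :: d :: t =>
    rw [pvRepC] at h
    split at h
    · left; simp at h; exact h.symm
    · right; simp at h; simp [h]

lemma pvDec_nil : pvDec [] = [] := rfl

lemma pvDec_esc1 (f : List Char) : pvDec ('~' :: '1' :: f) = '/' :: pvDec f := by
  unfold pvDec
  rw [show pvRepC '~' '1' '/' ('~' :: '1' :: f) = '/' :: pvRepC '~' '1' '/' f by simp [pvRepC]]
  rw [pvRepC_cons_ne _ _ _ _ _ (by simp)]

lemma pvDec_esc0 (f : List Char) : pvDec ('~' :: '0' :: f) = '~' :: pvDec f := by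
  unfold pvDec
  rw [pvRepC_cons_ne '~' '1' '/' '~' ('0' :: f) (by simp)]
  rw [pvRepC_cons_ne '~' '1' '/' '0' f (by simp)]
  rw [show pvRepC '~' '0' '~' ('~' :: '0' :: pvRepC '~' '1' '/' f)
        = '~' :: pvRepC '~' '0' '~' (pvRepC '~' '1' '/' f) by simp [pvRepC]]

lemma pvDec_plain (c : Char) (f : List Char) (hc : c ≠ '~') : pvDec (c :: f) = c :: pvDec f := by
  unfold pvDec
  rw [pvRepC_cons_ne '~' '1' '/' c f (by simp [hc])]
  rw [pvRepC_cons_ne '~' '0' '~' c _ (by simp [hc])]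

lemma pvDec_tilde (f : List Char) (h0 : f.head? ≠ some '0') (h1 : f.head? ≠ some '1') :
    pvDec ('~' :: f) = '~' :: pvDec f := by
  unfold pvDec
  rw [pvRepC_cons_ne '~' '1' '/' '~' f (by simp [h1])]
  rw [pvRepC_cons_ne '~' '0' '~' '~' _ ?hne]
  case hne =>
    rintro ⟨-, hh⟩
    rcases pvRepC_head? '~' '1' '/' f '0' hh with h | h
    · exact absurd h (by decide)
    · exact h0 h

lemma pvSplitP_head (t : List Char) (x : Char) (h : (pvSplitP t).1.head? = some x) :
    t.head? = some x := by
  cases t with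
  | nil => simp [pvSplitP] at h
  | cons d t' =>
    rw [pvSplitP] at h
    by_cases hd : d = '/'
    · simp [hd] at h
    · simp [hd] at h ⊢; exact h

-- the scanner produces exactly decode-of-split
lemma pvScanGo_spec : ∀ (l buf : List Char) (toks : List (List Char)),
    pvScanGo l buf toks
      = toks.reverse ++ ((buf.reverse ++ pvDec (pvSplitP l).1) :: (pvSplitP l).2.map pvDec) := by
  intro l buf toks
  fun_induction pvScanGo l buf toks with
  | case1 buf toks => simp [pvSplitP, pvDec_nil]
  | case2 t buf toks ih => rw [ih]; simp [pvSplitP, pvDec_nil]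
  | case3 t buf toks ih => rw [ih]; simp [pvSplitP, pvDec_esc1]
  | case4 t buf toks ih => rw [ih]; simp [pvSplitP, pvDec_esc0]
  | case5 c t buf toks h1 h2 h3 ih =>
    rw [ih]
    rw [show pvSplitP (c :: t) = (c :: (pvSplitP t).1, (pvSplitP t).2) by
      simp [pvSplitP]; intro hc; exact absurd hc h1]
    by_cases hc : c = '~'
    · subst hc
      rw [pvDec_tilde _ ?h0 ?h1]
      case h0 =>
        intro hh
        have ht := pvSplitP_head _ _ hh
        cases t with
        | nil => simp at ht
        | cons d t' => simp at ht; exact h3 t' rfl (by rw [ht])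
      case h1 =>
        intro hh
        have ht := pvSplitP_head _ _ hh
        cases t with
        | nil => simp at ht
        | cons d t' => simp at ht; exact h2 t' rfl (by rw [ht])
      simp
    · rw [pvDec_plain c _ hc]
      simp

lemma pvDecode_ofList (l : List Char) :
    pv_decode_token (String.ofList l) = String.ofList (pvDec l) := by
  unfold pv_decode_token pvDec
  rw [PySem.Str.replace, PySem.Str.replace]
  simp only [String.toList_ofList]
  rw [show ("~1" : String).toList = ['~', '1'] from rfl,
      show ("~0" : String).toList = ['~', '0'] from rfl,
      show ("/" : String).toList = ['/'] from rfl,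
      show ("~" : String).toList = ['~'] from rfl]
  rw [pvReplaceC_eq, pvReplaceC_eq]

lemma pvFoldl_append (g : String → String) : ∀ (l acc : List String),
    l.foldl (fun r t => r ++ [g t]) acc = acc ++ l.map g := by
  intro l
  induction l with
  | nil => intro acc; simp
  | cons x t ih => intro acc; simp [List.foldl, ih]

-- ===== VERDICT (by name: the statement is the Claim_ definition above) =====
theorem parse_json_pointer_spec : Claim_equal_parse_json_pointer := by
  intro ptr _ hpre
  unfold Spec_parse_json_pointer
  by_cases h1 : ptr = "" ∨ ptr = "/"
  · simp [parse_json_pointer, parse_json_pointer_alt, h1]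
  · have hs : PySem.Str.startswith ptr "/" = true := by
      rcases hpre with h | h
      · exact absurd (Or.inl h) h1
      · exact h
    have hpfx : ['/'] <+: ptr.toList :=
      (PySem.Chars.startswith_iff ptr.toList ("/" : String).toList).mp (by
        rw [← PySem.Str.startswith_eq]; exact hs)
    obtain ⟨cs', hcs⟩ : ∃ cs', ptr.toList = '/' :: cs' := by
      obtain ⟨t, ht⟩ := hpfx
      exact ⟨t, ht.symm⟩
    have hs' : PySem.Chars.startswith ptr.toList ['/'] = true := by
      rw [show (['/'] : List Char) = ("/" : String).toList from rfl, ← PySem.Str.startswith_eq]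
      exact hs
    rw [parse_json_pointer, parse_json_pointer_alt, if_neg h1, if_neg h1,
        if_neg (by simp [hs']), if_neg (by simp [hs'])]
    have hsplit : PySem.Str.split? ptr "/"
        = some (List.map String.ofList ((pvSplitP ptr.toList).1 :: (pvSplitP ptr.toList).2)) := by
      rw [show PySem.Str.split? ptr "/"
            = (PySem.Chars.split? ptr.toList ['/']).map (List.map String.ofList) from rfl]
      rw [PySem.Chars.split?]
      simp [pvSplitOn_eq]
    rw [hsplit]
    simp only [Option.getD_some]
    rw [PySem.List.slice_from_one]
    rw [hcs]
    rw [show pvSplitP ('/' :: cs') = ([], (pvSplitP cs').1 :: (pvSplitP cs').2) by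
      simp [pvSplitP]]
    simp only [List.map_cons, List.tail_cons, List.drop_succ_cons, List.drop_zero]
    rw [pvFoldl_append]
    rw [pvScanGo_spec]
    simp [List.map_map, Function.comp_def, pvDecode_ofList]
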